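-- pv_equiv track=rewrite | github.com/hongminjoon/Freshman_repo | coding_test_python/1_22/47.py | solution
-- ===== SOURCE A (Python) =====
-- def solution(a, b, n):
--     answer = 0
--
--     while n >= a:
--         new_n = n // a * b
--         remind = n % a
--
--         answer += new_n
--
--         n = new_n + remind
--
--     return answer
-- ===== SOURCE B (Python) =====
-- def solution(a, b, n):
--     # the number of a-for-b exchanges is floor((n-a)/(a-b))+1 when n >= a
--     if n < a:
--         return 0
--     return ((n - a) // (a - b) + 1) * b
-- ===== Notes on version B (the rewrite author's own statement) =====
-- stated objective: simpler
-- what changed: Replaced the repeated-exchange while loop with a closed form: the number of a-for-b exchanges is floor((n-a)/(a-b))+1 when n>=a (else 0), and the answer is that count times b.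
-- outside the precondition, e.g. on solution(-1, 1, 5): A returns -5, B returns -2; on solution(3, -1, 10): A returns -3, B returns -2
import Mathlib
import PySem

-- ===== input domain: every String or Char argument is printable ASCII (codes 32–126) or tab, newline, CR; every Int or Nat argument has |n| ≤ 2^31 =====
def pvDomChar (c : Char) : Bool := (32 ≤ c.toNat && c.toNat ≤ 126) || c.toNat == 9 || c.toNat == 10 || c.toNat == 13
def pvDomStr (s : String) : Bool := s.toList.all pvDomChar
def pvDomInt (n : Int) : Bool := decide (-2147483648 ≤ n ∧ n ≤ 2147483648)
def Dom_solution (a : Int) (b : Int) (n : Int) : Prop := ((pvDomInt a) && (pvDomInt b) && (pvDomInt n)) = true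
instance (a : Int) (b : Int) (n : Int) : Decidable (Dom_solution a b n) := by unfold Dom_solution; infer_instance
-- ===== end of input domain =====

-- B replaces the a-for-b exchange loop with a closed form for the number of exchanges.


-- ===== PORT A =====
-- the while loop of A, with fuel only to make it total in Lean (inside Pre_ the fuel
-- n.toNat + 1 is always sufficient, proved below)
def solutionLoop (a : Int) (b : Int) : Nat → Int → Int → Int
  | 0, _, answer => answer
  | f + 1, n, answer =>
    if n ≥ a then
      let new_n := PySem.Int.floordiv n a * b
      let remind := PySem.Int.mod n a
      solutionLoop a b f (new_n + remind) (answer + new_n)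
    else answer

def solution (a : Int) (b : Int) (n : Int) : Int :=
  solutionLoop a b (n.toNat + 1) n 0

-- ===== PORT B =====
def solution_alt (a : Int) (b : Int) (n : Int) : Int :=
  if n < a then 0
  else (PySem.Int.floordiv (n - a) (a - b) + 1) * b

-- ===== PRECONDITION & SPEC =====
-- Pre_ restricts the loop case (n ≥ a) to the task's natural domain 0 ≤ b < a: outside it A
-- either raises ZeroDivisionError (a = 0), never terminates (b ≥ a), or returns accidental
-- values of Python's floor division on negative a or negative b.
def Pre_solution (a : Int) (b : Int) (n : Int) : Prop :=
  n < a ∨ (0 < a ∧ 0 ≤ b ∧ b < a)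
instance (a : Int) (b : Int) (n : Int) : Decidable (Pre_solution a b n) := by
  unfold Pre_solution; infer_instance
def pvWitness_solution : Int × Int × Int := (3, 1, 10)
def Spec_solution (a : Int) (b : Int) (n : Int) (out : Int) : Prop := out = solution_alt a b n
instance (a : Int) (b : Int) (n : Int) (out : Int) : Decidable (Spec_solution a b n out) := by unfold Spec_solution; infer_instance

-- ===== CLAIM (what is proved, stated in full; the proofs are below) =====
def Claim_equal_solution : Prop := ∀ (a : Int) (b : Int) (n : Int), Dom_solution a b n → Pre_solution a b n → Spec_solution a b n (solution a b n)

-- ===== LEMMAS AND PROOFS =====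

-- one loop step preserves the closed form: alt n = (n//a)*b + alt n' where n' = (n//a)*b + n%a
theorem alt_step (a b n : Int) (ha : 0 < a) (hb : 0 ≤ b) (hba : b < a) (hn : a ≤ n) :
    solution_alt a b n =
      PySem.Int.floordiv n a * b +
        solution_alt a b (PySem.Int.floordiv n a * b + PySem.Int.mod n a) := by
  have hfd : PySem.Int.floordiv n a = n / a := PySem.Int.floordiv_eq_ediv_of_pos ha
  have hmd : PySem.Int.mod n a = n % a := PySem.Int.mod_eq_emod_of_pos ha
  have hc : 0 < a - b := by omega
  set q := n / a with hq
  set r := n % a with hr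
  have hqr : q * a + r = n := by rw [hq, hr]; rw [mul_comm]; exact Int.ediv_add_emod n a
  have hr0 : 0 ≤ r := Int.emod_nonneg n (by omega)
  have hra : r < a := Int.emod_lt_of_pos n ha
  have hq1 : 1 ≤ q := by
    rw [hq, Int.le_ediv_iff_mul_le ha]; omega
  set n' := q * b + r with hn'
  have hn'n : n' = n - q * (a - b) := by rw [hn']; ring_nf; omega
  have hfd' : PySem.Int.floordiv (n - a) (a - b) = (n - a) / (a - b) :=
    PySem.Int.floordiv_eq_ediv_of_pos hc
  rw [hfd, hmd, ← hn']
  by_cases hcase : n' < a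
  · -- last iteration: (n-a)/(a-b) = q - 1
    have hlow : 0 ≤ n' - b := by nlinarith
    have hdiv : (n - a) / (a - b) = q - 1 := by
      have : n - a = (n' - b) + (q - 1) * (a - b) := by rw [hn'n]; ring
      rw [this, Int.add_mul_ediv_right _ _ (by omega : a - b ≠ 0),
          Int.ediv_eq_zero_of_lt hlow (by omega)]
      ring
    simp only [solution_alt, if_neg (by omega : ¬ n < a), if_pos hcase, hfd', hdiv]
    ring
  · -- loop continues: (n-a)/(a-b) = q + (n'-a)/(a-b)
    have hfd'' : PySem.Int.floordiv (n' - a) (a - b) = (n' - a) / (a - b) :=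
      PySem.Int.floordiv_eq_ediv_of_pos hc
    have hdiv : (n - a) / (a - b) = (n' - a) / (a - b) + q := by
      have : n - a = (n' - a) + q * (a - b) := by rw [hn'n]; ring
      rw [this, Int.add_mul_ediv_right _ _ (by omega : a - b ≠ 0)]
    simp only [solution_alt, if_neg (by omega : ¬ n < a), if_neg (by omega : ¬ n' < a),
      hfd', hfd'', hdiv]
    ring

-- with enough fuel the loop computes the closed form
theorem loop_eq (a b : Int) (ha : 0 < a) (hb : 0 ≤ b) (hba : b < a) :
    ∀ (f : Nat) (n ans : Int), n.toNat < f →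
      solutionLoop a b f n ans = ans + solution_alt a b n := by
  intro f
  induction f with
  | zero => intro n ans h; omega
  | succ f ih =>
    intro n ans h
    by_cases hn : n ≥ a
    · have hfd : PySem.Int.floordiv n a = n / a := PySem.Int.floordiv_eq_ediv_of_pos ha
      have hmd : PySem.Int.mod n a = n % a := PySem.Int.mod_eq_emod_of_pos ha
      set q := n / a with hq
      set r := n % a with hr
      have hqr : q * a + r = n := by rw [hq, hr]; rw [mul_comm]; exact Int.ediv_add_emod n a
      have hr0 : 0 ≤ r := Int.emod_nonneg n (by omega)
      have hra : r < a := Int.emod_lt_of_pos n ha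
      have hq1 : 1 ≤ q := by rw [hq, Int.le_ediv_iff_mul_le ha]; omega
      have hlt : q * b + r < n := by nlinarith
      have hge : 0 ≤ q * b + r := by positivity
      have hstep : solutionLoop a b (f + 1) n ans =
          solutionLoop a b f (q * b + r) (ans + q * b) := by
        simp only [solutionLoop, if_pos hn, hfd, hmd]
      rw [hstep, ih (q * b + r) (ans + q * b) (by omega),
          alt_step a b n ha hb hba hn, hfd, hmd]
      ring
    · simp only [solutionLoop, if_neg hn, solution_alt, if_pos (by omega : n < a)]
      ring

-- ===== VERDICT (by name: the statement is the Claim_ definition above) =====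
theorem solution_spec : Claim_equal_solution := by
  intro a b n _ hpre
  unfold Spec_solution solution
  rcases hpre with hlt | ⟨ha, hb, hba⟩
  · -- n < a: the loop exits immediately and B returns 0
    have h1 : solutionLoop a b (n.toNat + 1) n 0 = 0 := by
      simp only [solutionLoop, if_neg (by omega : ¬ n ≥ a)]
    rw [h1, solution_alt, if_pos hlt]
  · exact (loop_eq a b ha hb hba (n.toNat + 1) n 0 (by omega)).trans (by ring_nf)
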